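-- pv_equiv track=rewrite | github.com/kpi-jps/ads_python_dev | dictionaries/ex1.py | listaTermos
-- ===== SOURCE A (Python) =====
-- def listaTermos(entrada):
--     lista_termos = []
--     termo = ''
--     for caracter in range(len(entrada)):
--         # caracteres que definem o final de um termo
--         if entrada[caracter] == ' ' or entrada[caracter] == ',' or entrada[caracter] == '.' or entrada[caracter] == '!' or entrada[caracter] == '?':
--             lista_termos.append(termo)
--             lista_termos.append(entrada[caracter])
--             termo = '' # deixa como vazio o termo para receber novos caracteres
--         # consideração necessária para identificar apenas um termo ou termo final de uma frase
--         elif caracter == (len(entrada) - 1):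
--             termo = termo = termo + entrada[caracter]
--             lista_termos.append(termo)
--         else:
--             termo = termo + entrada[caracter]
--     return lista_termos
-- ===== SOURCE B (Python) =====
-- def listaTermos(entrada):
--     seps = (' ', ',', '.', '!', '?')
--     partes = ['']
--     for c in reversed(entrada):
--         if c in seps:
--             partes.append(c)
--             partes.append('')
--         else:
--             partes[-1] = c + partes[-1]
--     partes.reverse()
--     if partes[-1] == '':
--         partes.pop()
--     return partes
-- ===== Notes on version B (the rewrite author's own statement) =====
-- stated objective: alternative
-- what changed: B builds the token list in one backward pass over the characters (extending the current front chunk, emitting separator+empty on each delimiter) and pops one trailing empty chunk, instead of A's forward index loop with a term accumulator and a special case at the last index.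
import Mathlib
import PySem

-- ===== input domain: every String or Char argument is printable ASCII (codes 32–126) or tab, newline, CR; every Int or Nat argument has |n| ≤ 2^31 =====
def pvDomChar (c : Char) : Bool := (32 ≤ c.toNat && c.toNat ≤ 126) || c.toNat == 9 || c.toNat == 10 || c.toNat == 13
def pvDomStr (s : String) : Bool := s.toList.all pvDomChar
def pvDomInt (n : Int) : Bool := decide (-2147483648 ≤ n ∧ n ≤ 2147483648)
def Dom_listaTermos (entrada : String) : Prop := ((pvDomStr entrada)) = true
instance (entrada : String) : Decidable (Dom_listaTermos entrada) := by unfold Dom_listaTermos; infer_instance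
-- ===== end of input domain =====

-- B tokenizes in one backward pass (extend front chunk / emit separator+empty) and pops one
-- trailing empty chunk, instead of A's forward index loop with a term accumulator and a
-- last-index special case; same cost, different structure (objective: alternative).

-- ===== PORT A =====
-- loop body of A's 'for caracter in range(len(entrada))'; state = (lista_termos, termo)
def listaTermosStepA (cs : List Char) (s : List String × List Char) (i : Int) :
    List String × List Char :=
  let c := PySem.List.pyGetD cs i ' '
  if c = ' ' ∨ c = ',' ∨ c = '.' ∨ c = '!' ∨ c = '?' then
    (s.1 ++ [String.ofList s.2, String.ofList [c]], [])
  else if i = (cs.length : Int) - 1 then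
    (s.1 ++ [String.ofList (s.2 ++ [c])], s.2 ++ [c])
  else
    (s.1, s.2 ++ [c])

def listaTermos (entrada : String) : List String :=
  let cs := entrada.toList
  ((PySem.List.pyRange 0 (PySem.Str.len entrada) 1).foldl (listaTermosStepA cs) ([], [])).1

-- ===== PORT B =====
-- loop body of B's 'for c in reversed(entrada)'; state = partes (list of chunks, active at END)
def listaTermosStepB (partes : List (List Char)) (c : Char) : List (List Char) :=
  if c ∈ ([' ', ',', '.', '!', '?'] : List Char) then
    partes ++ [[c]] ++ [[]]                               -- partes.append(c); partes.append('')
  else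
    partes.dropLast ++ [c :: partes.getLast?.getD []]            -- partes[-1] = c + partes[-1]

def listaTermos_alt (entrada : String) : List String :=
  let partes := entrada.toList.reverse.foldl listaTermosStepB [[]]
  let partes := partes.reverse
  let partes := if partes.getLast? = some [] then partes.dropLast else partes  -- pop trailing ''
  partes.map String.ofList

-- ===== PRECONDITION & SPEC =====
def Spec_listaTermos (entrada : String) (out : List String) : Prop := out = listaTermos_alt entrada
instance (entrada : String) (out : List String) : Decidable (Spec_listaTermos entrada out) := by unfold Spec_listaTermos; infer_instance

-- ===== CLAIM (what is proved, stated in full; the proofs are below) =====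
def Claim_equal_listaTermos : Prop := ∀ (entrada : String), Dom_listaTermos entrada → Spec_listaTermos entrada (listaTermos entrada)

-- ===== LEMMAS AND PROOFS =====

-- direct recursion computing A's loop over the remaining characters
def aRec : List Char → List Char → List String → List String
  | [], _, acc => acc
  | c :: rest, termo, acc =>
    if c = ' ' ∨ c = ',' ∨ c = '.' ∨ c = '!' ∨ c = '?' then
      aRec rest [] (acc ++ [String.ofList termo, String.ofList [c]])
    else if rest = [] then
      acc ++ [String.ofList (termo ++ [c])]
    else
      aRec rest (termo ++ [c]) acc

-- front-active version of B's loop body (B's body acting on the reversed chunk list)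
def stepF (partes : List (List Char)) (c : Char) : List (List Char) :=
  if c ∈ ([' ', ',', '.', '!', '?'] : List Char) then
    [] :: [c] :: partes
  else
    match partes with
    | [] => [[c]]
    | h :: t => (c :: h) :: t

-- B's chunk list as a foldr
def splitKeep (cs : List Char) : List (List Char) := cs.foldr (fun c p => stepF p c) [[]]

-- drop one trailing empty chunk
def popEmpty (l : List (List Char)) : List (List Char) :=
  if l.getLast? = some [] then l.dropLast else l

-- prepend a pending term to the first chunk
def prefT (termo : List Char) : List (List Char) → List (List Char)
  | [] => []
  | h :: t => (termo ++ h) :: t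

theorem splitKeep_cons (c : Char) (rest : List Char) :
    splitKeep (c :: rest) = stepF (splitKeep rest) c := by
  simp [splitKeep]

theorem stepF_ne_nil (p : List (List Char)) (c : Char) : stepF p c ≠ [] := by
  unfold stepF
  split
  · simp
  · cases p <;> simp

theorem splitKeep_ne_nil (cs : List Char) : splitKeep cs ≠ [] := by
  cases cs with
  | nil => simp [splitKeep]
  | cons c rest => rw [splitKeep_cons]; exact stepF_ne_nil _ c

theorem stepB_eq_rev_stepF (p : List (List Char)) (c : Char) :
    listaTermosStepB p c = (stepF p.reverse c).reverse := by
  unfold listaTermosStepB stepF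
  by_cases h : c ∈ ([' ', ',', '.', '!', '?'] : List Char) <;> simp [h]
  · cases p using List.reverseRecOn with
    | nil => simp
    | append_singleton q x => simp

theorem foldr_stepB_eq (cs : List Char) :
    List.foldr (fun x y => listaTermosStepB y x) [[]] cs = (splitKeep cs).reverse := by
  induction cs with
  | nil => simp [splitKeep]
  | cons c rest ih =>
      rw [List.foldr_cons, ih, stepB_eq_rev_stepF, List.reverse_reverse, splitKeep_cons]

theorem popEmpty_cons_cons (a b : List Char) (l : List (List Char)) (h : l ≠ []) :
    popEmpty (a :: b :: l) = a :: b :: popEmpty l := by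
  unfold popEmpty
  cases l with
  | nil => exact absurd rfl h
  | cons x t =>
      simp only [List.getLast?_cons_cons]
      split <;> simp_all [List.dropLast]

theorem prefT_nil_of_ne (l : List (List Char)) (h : l ≠ []) : prefT [] l = l := by
  cases l with
  | nil => exact absurd rfl h
  | cons a b => simp [prefT]

-- core: A's recursion equals B's chunk pipeline, for a nonempty remainder
theorem aRec_eq (cs : List Char) (hne : cs ≠ []) : ∀ (termo : List Char) (acc : List String),
    aRec cs termo acc = acc ++ (popEmpty (prefT termo (splitKeep cs))).map String.ofList := by
  induction cs with
  | nil => exact absurd rfl hne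
  | cons c rest ih =>
      intro termo acc
      have hsk := splitKeep_ne_nil rest
      by_cases hsep : c = ' ' ∨ c = ',' ∨ c = '.' ∨ c = '!' ∨ c = '?'
      · have hmem : c ∈ ([' ', ',', '.', '!', '?'] : List Char) := by
          rcases hsep with h|h|h|h|h <;> simp [h]
        have hstep : splitKeep (c :: rest) = [] :: [c] :: splitKeep rest := by
          rw [splitKeep_cons]; unfold stepF; rw [if_pos hmem]
        rw [aRec, if_pos hsep, hstep]
        have hpre : prefT termo ([] :: [c] :: splitKeep rest)
            = termo :: [c] :: splitKeep rest := by simp [prefT]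
        rw [hpre, popEmpty_cons_cons _ _ _ hsk]
        cases hrest : rest with
        | nil =>
            subst hrest
            simp [aRec, splitKeep, popEmpty, stepF]
        | cons r rs =>
            rw [← hrest]
            have hrne : rest ≠ [] := by simp [hrest]
            rw [ih hrne, prefT_nil_of_ne _ hsk]
            simp
      · have hmem : c ∉ ([' ', ',', '.', '!', '?'] : List Char) := by
          intro h; apply hsep; simp at h; tauto
        cases hrest : rest with
        | nil =>
            subst hrest
            have hstep : splitKeep [c] = [[c]] := by
              rw [splitKeep_cons]; unfold stepF; rw [if_neg hmem]; rfl
            rw [aRec, if_neg hsep, if_pos rfl, hstep]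
            simp [prefT, popEmpty]
        | cons r rs =>
            rw [← hrest]
            have hrne : rest ≠ [] := by simp [hrest]
            cases h : splitKeep rest with
            | nil => exact absurd h hsk
            | cons a b =>
                have hstep : splitKeep (c :: rest) = (c :: a) :: b := by
                  rw [splitKeep_cons]; unfold stepF; rw [if_neg hmem, h]
                rw [aRec, if_neg hsep, if_neg hrne, ih hrne, hstep, h]
                simp [prefT]

-- A's index loop computes aRec on the dropped suffix
theorem loopA (cs : List Char) : ∀ (m k : Nat), cs.length - k = m → k ≤ cs.length →
    ∀ (termo : List Char) (acc : List String),
    ((PySem.List.pyRange (k : Int) (cs.length : Int) 1).foldl (listaTermosStepA cs) (acc, termo)).1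
      = aRec (cs.drop k) termo acc := by
  intro m
  induction m with
  | zero =>
      intro k hm hk termo acc
      have hk' : k = cs.length := by omega
      rw [PySem.List.pyRange_one_eq_nil (by omega)]
      simp [hk', aRec]
  | succ n ih =>
      intro k hm hk termo acc
      have hlt : k < cs.length := by omega
      rw [PySem.List.pyRange_one_cons (by exact_mod_cast hlt)]
      rw [List.foldl_cons]
      have hdrop : cs.drop k = cs[k] :: cs.drop (k + 1) := (List.getElem_cons_drop hlt).symm
      have hget : PySem.List.pyGetD cs (k : Int) ' ' = cs[k] := by
        rw [PySem.List.pyGetD_natCast]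
        exact List.getD_eq_getElem cs ' ' hlt
      rw [hdrop, aRec]
      by_cases hsep : cs[k] = ' ' ∨ cs[k] = ',' ∨ cs[k] = '.' ∨ cs[k] = '!' ∨ cs[k] = '?'
      · rw [if_pos hsep]
        have hstep : listaTermosStepA cs (acc, termo) (k : Int)
            = (acc ++ [String.ofList termo, String.ofList [cs[k]]], []) := by
          simp only [listaTermosStepA, hget]
          rw [if_pos hsep]
        rw [hstep]
        have h2 := ih (k + 1) (by omega) (by omega) [] (acc ++ [String.ofList termo, String.ofList [cs[k]]])
        push_cast at h2
        rw [h2]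
      · rw [if_neg hsep]
        by_cases hlast : k = cs.length - 1
        · have hdone : cs.drop (k + 1) = [] := by
            apply List.drop_eq_nil_of_le; omega
          rw [if_pos hdone]
          have hstep : listaTermosStepA cs (acc, termo) (k : Int)
              = (acc ++ [String.ofList (termo ++ [cs[k]])], termo ++ [cs[k]]) := by
            simp only [listaTermosStepA, hget]
            rw [if_neg hsep, if_pos (by omega)]
          rw [hstep]
          have h2 := ih (k + 1) (by omega) (by omega) (termo ++ [cs[k]])
              (acc ++ [String.ofList (termo ++ [cs[k]])])
          push_cast at h2
          rw [h2, hdone, aRec]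
        · have hne2 : cs.drop (k + 1) ≠ [] := by
            intro h
            have := List.drop_eq_nil_iff.mp h
            omega
          rw [if_neg hne2]
          have hstep : listaTermosStepA cs (acc, termo) (k : Int)
              = (acc, termo ++ [cs[k]]) := by
            simp only [listaTermosStepA, hget]
            rw [if_neg hsep, if_neg (by omega)]
          rw [hstep]
          have h2 := ih (k + 1) (by omega) (by omega) (termo ++ [cs[k]]) acc
          push_cast at h2
          rw [h2]

theorem alt_eq (entrada : String) :
    listaTermos_alt entrada = (popEmpty (splitKeep entrada.toList)).map String.ofList := by
  unfold listaTermos_alt popEmpty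
  rw [List.foldl_reverse, foldr_stepB_eq]
  simp

-- ===== VERDICT (by name: the statement is the Claim_ definition above) =====
theorem listaTermos_spec : Claim_equal_listaTermos := by
  unfold Claim_equal_listaTermos Spec_listaTermos
  intro entrada _
  rw [alt_eq]
  unfold listaTermos
  rw [PySem.Str.len_eq]
  by_cases hne : entrada.toList = []
  · rw [hne]
    simp [PySem.List.pyRange_one_eq_nil, splitKeep, popEmpty]
  · have h0 := loopA entrada.toList (entrada.toList.length) 0 rfl (by omega) [] []
    simp only [Nat.cast_zero] at h0
    rw [h0, List.drop_zero, aRec_eq entrada.toList hne [] [],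
        prefT_nil_of_ne _ (splitKeep_ne_nil _)]
    simp
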